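-- pv_equiv track=rewrite | github.com/16-SulGore/Algorithm | week_02/방금그곡.py | get_real_score
-- ===== SOURCE A (Python) =====
-- def get_real_score(score):
--     real_score = []
--     for score_unit in score.split('#'):
--         if score_unit:
--             real_score += score_unit
--             real_score[-1] = score_unit[-1] + '#'
--     if score[-1] != '#':
--         real_score[-1] = real_score[-1][0]
--     return real_score
-- ===== SOURCE B (Python) =====
-- def get_real_score(score):
--     res = []
--     for c in score:
--         if c == '#':
--             if res:
--                 res[-1] = res[-1][0] + '#'
--         else:
--             res.append(c)
--     return res
-- ===== Notes on version B (the rewrite author's own statement) =====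
-- stated objective: simpler
-- what changed: Replaced the split-on-sharp-then-patch-last-element loop (plus the final un-sharpening fixup) with a single left-to-right character scan that appends plain characters and attaches a sharp to the last token in place, needing no post-pass.
import Mathlib
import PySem

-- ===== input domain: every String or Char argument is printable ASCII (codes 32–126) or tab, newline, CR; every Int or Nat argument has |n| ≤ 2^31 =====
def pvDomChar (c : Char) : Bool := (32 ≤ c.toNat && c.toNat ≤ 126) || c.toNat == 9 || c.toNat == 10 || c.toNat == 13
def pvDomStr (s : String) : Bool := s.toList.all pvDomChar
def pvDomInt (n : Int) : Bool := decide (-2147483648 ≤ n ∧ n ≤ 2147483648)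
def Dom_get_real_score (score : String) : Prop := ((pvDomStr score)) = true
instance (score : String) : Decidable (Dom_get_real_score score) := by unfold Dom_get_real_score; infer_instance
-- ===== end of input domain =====

-- B replaces A's split-on-sharp loop plus final fixup by a single character scan; same values wherever A returns.

-- ===== PORT A =====
-- real_score += score_unit; real_score[-1] = score_unit[-1] + '#'   (strings are handled as their char lists; exact on all inputs)
def pvStepA (acc : List String) (u : List Char) : List String :=
  if u ≠ [] then
    PySem.List.pySetD (acc ++ u.map (fun c => String.ofList [c])) (-1)
      (String.ofList [PySem.List.pyGetD u (-1) ' ', '#'])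
  else acc

def get_real_score (score : String) : List String :=
  let real_score := (PySem.Chars.splitOn score.toList ['#']).foldl pvStepA []
  -- if score[-1] != '#': real_score[-1] = real_score[-1][0]
  match PySem.List.pyGet? score.toList (-1) with
  | some c =>
      if c ≠ '#' then
        PySem.List.pySetD real_score (-1)
          (String.ofList [PySem.List.pyGetD (PySem.List.pyGetD real_score (-1) "").toList 0 ' '])
      else real_score
  | none => real_score   -- score == '': Python raises IndexError here; excluded by Pre_

-- ===== PORT B =====
def pvStepB (res : List String) (c : Char) : List String :=
  if c = '#' then
    if res ≠ [] then
      PySem.List.pySetD res (-1)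
        (String.ofList [PySem.List.pyGetD (PySem.List.pyGetD res (-1) "").toList 0 ' ', '#'])
    else res
  else res ++ [String.ofList [c]]

def get_real_score_alt (score : String) : List String :=
  score.toList.foldl pvStepB []

-- ===== PRECONDITION & SPEC =====
-- Pre_ excludes only the empty string, on which A raises IndexError (score[-1]).
def Pre_get_real_score (score : String) : Prop := score.toList ≠ []
instance (score : String) : Decidable (Pre_get_real_score score) := by unfold Pre_get_real_score; infer_instance
def pvWitness_get_real_score : String := "C#DE#"

def Spec_get_real_score (score : String) (out : List String) : Prop := out = get_real_score_alt score
instance (score : String) (out : List String) : Decidable (Spec_get_real_score score out) := by unfold Spec_get_real_score; infer_instance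

-- ===== CLAIM (what is proved, stated in full; the proofs are below) =====
def Claim_equal_get_real_score : Prop := ∀ (score : String), Dom_get_real_score score → Pre_get_real_score score → Spec_get_real_score score (get_real_score score)

-- ===== LEMMAS AND PROOFS =====

def pvSng (c : Char) : String := String.ofList [c]

def pvMkSharp (u : List Char) : List String :=
  if h : u = [] then [] else u.dropLast.map pvSng ++ [String.ofList [u.getLast h, '#']]

def pvBlist : List (List Char) → List String
  | [] => []
  | [u] => u.map pvSng
  | u :: v :: us => pvMkSharp u ++ pvBlist (v :: us)

lemma pvSetLast {α : Type} (xs : List α) (x v : α) :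
    PySem.List.pySetD (xs ++ [x]) (-1) v = xs ++ [v] := by
  simp [PySem.List.pySetD, PySem.List.pySet?, PySem.List.pyIdx?]

lemma pvModLast_cons {α : Type} (f : α → α) (a : α) (S : List α) (h : S ≠ []) :
    List.modifyLast f (a :: S) = a :: List.modifyLast f S := by
  obtain ⟨S', s, rfl⟩ := (List.eq_nil_or_concat S).resolve_left h
  simp only [List.concat_eq_append]
  rw [← List.cons_append, List.modifyLast_concat, List.modifyLast_concat, List.cons_append]

lemma pvModHead_id {α : Type} (l : List α) : List.modifyHead (fun x => x) l = l := by
  cases l <;> simp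

lemma pvSplitGo : ∀ (fuel : Nat) (l cur : List Char) (acc : List (List Char)), l.length < fuel →
    PySem.Chars.splitOn.go ['#'] fuel l cur acc
      = acc.reverse ++ (List.splitOnP (· == '#') l).modifyHead (cur.reverse ++ ·) := by
  intro fuel
  induction fuel with
  | zero => intro l cur acc h; omega
  | succ f ih =>
    intro l cur acc h
    cases l with
    | nil => simp [PySem.Chars.splitOn.go, List.splitOnP_nil]
    | cons c rest =>
      simp only [PySem.Chars.splitOn.go]
      by_cases hc : c = '#'
      · subst hc
        simp only [List.isPrefixOf, BEq.rfl, Bool.true_and, if_pos]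
        rw [ih _ _ _ (by simp at h ⊢; omega)]
        simp [List.splitOnP_cons, pvModHead_id]
      · rw [if_neg (by simp [List.isPrefixOf]; exact Ne.symm hc)]
        rw [ih _ _ _ (by simp at h ⊢; omega)]
        rw [List.splitOnP_cons, if_neg (by simp [hc])]
        rcases hS : List.splitOnP (· == '#') rest with _ | ⟨s, S'⟩
        · exact absurd hS (List.splitOnP_ne_nil _ _)
        · simp [List.modifyHead]

lemma pvSplitOn (cs : List Char) :
    PySem.Chars.splitOn cs ['#'] = List.splitOnP (· == '#') cs := by
  rw [PySem.Chars.splitOn, pvSplitGo _ _ _ _ (by omega)]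
  simp [pvModHead_id]

lemma pvStepA_eq (acc : List String) (u : List Char) : pvStepA acc u = acc ++ pvMkSharp u := by
  rcases List.eq_nil_or_concat u with rfl | ⟨w, c, rfl⟩
  · simp [pvStepA, pvMkSharp]
  · simp only [List.concat_eq_append]
    have hne : w ++ [c] ≠ [] := by simp
    rw [pvStepA, if_pos hne, pvMkSharp, dif_neg hne]
    rw [PySem.List.pyGetD_neg_one_append_singleton]
    rw [List.map_append, List.map_singleton, ← List.append_assoc, pvSetLast]
    simp [pvSng]

lemma pvFoldA (us : List (List Char)) :
    us.foldl pvStepA [] = us.flatMap pvMkSharp := by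
  have : ∀ acc, us.foldl pvStepA acc = acc ++ us.flatMap pvMkSharp := by
    intro acc
    have := PySem.List.foldl_append_eq_flatMap pvMkSharp us acc
    rw [← this]
    congr 1
    funext a x
    exact pvStepA_eq a x
  simpa using this []

lemma pvBlist_cons (u : List Char) (S : List (List Char)) (h : S ≠ []) :
    pvBlist (u :: S) = pvMkSharp u ++ pvBlist S := by
  rcases S with _ | ⟨v, us⟩
  · exact absurd rfl h
  · rfl

lemma pvBlist_nil_cons (S : List (List Char)) (h : S ≠ []) :
    pvBlist ([] :: S) = pvBlist S := by
  rw [pvBlist_cons _ _ h, pvMkSharp]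
  simp

lemma pvModHead_nil_append {α : Type} (S : List (List α)) :
    List.modifyHead (fun x => ([] : List α) ++ x) S = S := by
  cases S <;> simp

lemma pvStepB_sharp (ys : List String) (x : Char) :
    pvStepB (ys ++ [String.ofList [x, '#']]) '#' = ys ++ [String.ofList [x, '#']] := by
  rw [pvStepB, if_pos rfl, if_pos (by simp)]
  rw [PySem.List.pyGetD_neg_one_append_singleton]
  rw [String.toList_ofList]
  rw [PySem.List.pyGetD_zero_cons, pvSetLast]

lemma pvB_main : ∀ (cs : List Char) (r : List String) (t : List Char),
    (r = [] ∨ ∃ ys x, r = ys ++ [String.ofList [x, '#']]) →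
    cs.foldl pvStepB (r ++ t.map pvSng)
      = r ++ pvBlist ((List.splitOnP (· == '#') cs).modifyHead (t ++ ·)) := by
  intro cs
  induction cs with
  | nil =>
    intro r t _
    simp [List.splitOnP_nil, List.modifyHead, pvBlist]
  | cons c cs ih =>
    intro r t hr
    rw [List.foldl_cons]
    by_cases hc : c = '#'
    · subst hc
      have hS := List.splitOnP_ne_nil (· == '#') cs
      rcases ht : t with _ | ⟨d, w⟩
      · -- empty pending token: the '#' sharpens r, a no-op
        have hstep : pvStepB (r ++ ([] : List Char).map pvSng) '#' = r := by
          rcases hr with rfl | ⟨ys, x, rfl⟩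
          · simp [pvStepB]
          · simpa using pvStepB_sharp ys x
        rw [hstep]
        have hih := ih r [] hr
        simp only [List.map_nil, List.append_nil] at hih
        rw [hih]
        rw [List.splitOnP_cons, if_pos (by simp), pvModHead_nil_append, pvModHead_nil_append,
      pvBlist_nil_cons _ hS]
      · -- nonempty pending token t: '#' turns it into a sharp unit
        rw [← ht]
        have htne : t ≠ [] := by simp [ht]
        have hstep : pvStepB (r ++ t.map pvSng) '#' = (r ++ pvMkSharp t) := by
          rw [pvStepB, if_pos rfl]
          conv_lhs => rw [show t.map pvSng = t.dropLast.map pvSng ++ [pvSng (t.getLast htne)] by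
            conv_lhs => rw [show t = t.dropLast ++ [t.getLast htne] from (List.dropLast_append_getLast htne).symm]
            rw [List.map_append, List.map_singleton]]
          rw [if_pos (by simp), ← List.append_assoc]
          rw [PySem.List.pyGetD_neg_one_append_singleton]
          rw [show pvSng (t.getLast htne) = String.ofList [t.getLast htne] from rfl]
          rw [String.toList_ofList, PySem.List.pyGetD_zero_cons, pvSetLast]
          rw [pvMkSharp, dif_neg htne, ← List.append_assoc]
        rw [hstep]
        have hr' : (r ++ pvMkSharp t = [] ∨ ∃ ys x, r ++ pvMkSharp t = ys ++ [String.ofList [x, '#']]) := by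
          right
          exact ⟨r ++ t.dropLast.map pvSng, t.getLast htne, by rw [pvMkSharp, dif_neg htne, ← List.append_assoc]⟩
        have hih := ih (r ++ pvMkSharp t) [] hr'
        simp only [List.map_nil, List.append_nil] at hih
        rw [hih]
        rw [List.splitOnP_cons, if_pos (by simp), pvModHead_nil_append]
        have hm : List.modifyHead (fun x => t ++ x) ([] :: List.splitOnP (· == '#') cs)
            = t :: List.splitOnP (· == '#') cs := by
          simp [List.modifyHead]
        rw [hm, pvBlist_cons _ _ hS, List.append_assoc]
    · have hstep : pvStepB (r ++ t.map pvSng) c = r ++ (t ++ [c]).map pvSng := by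
        rw [pvStepB, if_neg hc]
        simp [pvSng]
      rw [hstep, ih r (t ++ [c]) hr]
      rw [List.splitOnP_cons, if_neg (by simp [hc])]
      rw [List.modifyHead_modifyHead]
      congr 2
      rcases h' : List.splitOnP (· == '#') cs with _ | ⟨s, S⟩
      · exact absurd h' (List.splitOnP_ne_nil _ _)
      · simp [List.modifyHead]

lemma pvB_eq (cs : List Char) :
    cs.foldl pvStepB [] = pvBlist (List.splitOnP (· == '#') cs) := by
  have := pvB_main cs [] [] (Or.inl rfl)
  simpa [pvModHead_id] using this

lemma pvSplit_concat_sharp (xs : List Char) :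
    List.splitOnP (· == '#') (xs ++ ['#']) = List.splitOnP (· == '#') xs ++ [[]] := by
  have := List.splitOnP_append_cons (· == '#') xs [] '#' (by simp)
  simpa [List.splitOnP_nil] using this

lemma pvSplit_concat (c : Char) (hc : c ≠ '#') : ∀ (xs : List Char),
    List.splitOnP (· == '#') (xs ++ [c])
      = List.modifyLast (· ++ [c]) (List.splitOnP (· == '#') xs) := by
  intro xs
  induction xs with
  | nil =>
    rw [List.nil_append, List.splitOnP_cons, if_neg (by simp [hc]), List.splitOnP_nil]
    rw [show ([[]] : List (List Char)) = [] ++ [[]] from rfl, List.modifyLast_concat]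
    simp [List.modifyHead]
  | cons x xs ih =>
    rw [List.cons_append, List.splitOnP_cons, List.splitOnP_cons, ih]
    have hS := List.splitOnP_ne_nil (· == '#') xs
    by_cases hx : (x == '#') = true
    · rw [if_pos hx, if_pos hx, pvModLast_cons _ _ _ hS]
    · rw [if_neg hx, if_neg hx]
      rcases hS' : List.splitOnP (· == '#') xs with _ | ⟨s, S⟩
      · exact absurd hS' hS
      · rcases S with _ | ⟨s', S'⟩
        · rw [show ([s] : List (List Char)) = [] ++ [s] from rfl, List.modifyLast_concat]
          simp [List.modifyHead]
          rw [show ([x :: s] : List (List Char)) = [] ++ [x :: s] from rfl,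
            List.modifyLast_concat]
          simp
        · conv_lhs => rw [pvModLast_cons _ _ _ (show (s' :: S') ≠ [] by simp)]
          simp only [List.modifyHead]
          conv_rhs => rw [pvModLast_cons _ _ _ (show (s' :: S') ≠ [] by simp)]

lemma pvL7a : ∀ (us : List (List Char)) (h : us ≠ []), us.getLast h = [] →
    us.flatMap pvMkSharp = pvBlist us := by
  intro us
  induction us with
  | nil => intro h; exact absurd rfl h
  | cons u us ih =>
    intro h hl
    rcases us with _ | ⟨v, w⟩
    · simp at hl
      subst hl
      simp [pvMkSharp, pvBlist]
    · rw [List.flatMap_cons, pvBlist_cons _ _ (by simp)]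
      rw [ih (by simp) (by simpa [List.getLast_cons] using hl)]

lemma pvBlist_eq : ∀ (us : List (List Char)) (h : us ≠ []),
    pvBlist us = us.dropLast.flatMap pvMkSharp ++ (us.getLast h).map pvSng := by
  intro us
  induction us with
  | nil => intro h; exact absurd rfl h
  | cons u us ih =>
    intro h
    rcases us with _ | ⟨v, w⟩
    · simp [pvBlist]
    · rw [pvBlist_cons _ _ (by simp), ih (by simp)]
      simp [List.getLast_cons, List.append_assoc]

lemma pvL7b (us : List (List Char)) (h : us ≠ []) (hl : us.getLast h ≠ []) :
    PySem.List.pySetD (us.flatMap pvMkSharp) (-1)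
      (String.ofList
        [PySem.List.pyGetD (PySem.List.pyGetD (us.flatMap pvMkSharp) (-1) "").toList 0 ' '])
      = pvBlist us := by
  have hflat : us.flatMap pvMkSharp
      = (us.dropLast.flatMap pvMkSharp ++ (us.getLast h).dropLast.map pvSng)
        ++ [String.ofList [(us.getLast h).getLast hl, '#']] := by
    conv_lhs => rw [show us = us.dropLast ++ [us.getLast h] from
      (List.dropLast_append_getLast h).symm]
    rw [List.flatMap_append, List.flatMap_singleton, pvMkSharp, dif_neg hl, List.append_assoc]
  rw [hflat, PySem.List.pyGetD_neg_one_append_singleton, String.toList_ofList,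
    PySem.List.pyGetD_zero_cons, pvSetLast, pvBlist_eq us h]
  conv_rhs => rw [show (us.getLast h).map pvSng
      = (us.getLast h).dropLast.map pvSng ++ [pvSng ((us.getLast h).getLast hl)] by
    conv_lhs => rw [show us.getLast h = (us.getLast h).dropLast ++ [(us.getLast h).getLast hl]
      from (List.dropLast_append_getLast hl).symm]
    rw [List.map_append, List.map_singleton]]
  simp [pvSng, List.append_assoc]

theorem pv_main (score : String) (hpre : score.toList ≠ []) :
    get_real_score score = get_real_score_alt score := by
  obtain ⟨xs, c, hcs⟩ := (List.eq_nil_or_concat score.toList).resolve_left hpre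
  simp only [List.concat_eq_append] at hcs
  have hget : PySem.List.pyGet? (xs ++ [c]) (-1) = some c := by simp [pysem]
  rw [get_real_score_alt, hcs, pvB_eq]
  simp only [get_real_score, hcs, pvSplitOn, pvFoldA, hget]
  by_cases hc : c = '#'
  · subst hc
    rw [if_neg (by simp)]
    rw [pvSplit_concat_sharp]
    exact pvL7a _ (by simp) (by simp)
  · rw [if_pos hc]
    rw [pvSplit_concat c hc]
    obtain ⟨P, p, hP⟩ :=
      (List.eq_nil_or_concat (List.splitOnP (· == '#') xs)).resolve_left
        (List.splitOnP_ne_nil _ _)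
    simp only [List.concat_eq_append] at hP
    rw [hP, List.modifyLast_concat]
    exact pvL7b _ (by simp) (by simp)

-- ===== VERDICT (by name: the statement is the Claim_ definition above) =====
theorem get_real_score_spec : Claim_equal_get_real_score := by
  intro score _ hpre
  unfold Spec_get_real_score
  exact pv_main score hpre
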